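-- pv_equiv track=rewrite | github.com/Tjdtec/Keras_AESDM | Utils.py | update_result
-- ===== SOURCE A (Python) =====
-- def update_result(clf_pred, total_pred):
--     l = len(clf_pred)
--     index = 0
--     for i in range(0, len(total_pred) - 1):
--         if total_pred[i] == 0:
--             total_pred[i] = clf_pred[index]
--             index += 1
--         if index == l:
--             break
--     return total_pred
-- ===== SOURCE B (Python) =====
-- def update_result(clf_pred, total_pred):
--     # Prefix-sum reformulation: prefix[i] = number of zeros among total_pred[:i],
--     # so each zero position (except the last slot) gets its clf value by rank,
--     # independently, instead of threading a running counter with an early break.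
--     prefix = [0] * (len(total_pred) + 1)
--     for i, v in enumerate(total_pred):
--         prefix[i + 1] = prefix[i] + (v == 0)
--     for i in range(len(total_pred) - 1):
--         if total_pred[i] == 0 and prefix[i] < len(clf_pred):
--             total_pred[i] = clf_pred[prefix[i]]
--     return total_pred
-- ===== Notes on version B (the rewrite author's own statement) =====
-- stated objective: alternative
-- what changed: Replaces A's single interleaved scan with a running fill counter and early break by a prefix-sum formulation: a table prefix[i] = number of zeros among total_pred[:i] is built first, then each qualifying position is assigned clf_pred[prefix[i]] independently, with the cap expressed as prefix[i] < len(clf_pred) instead of a break.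
import Mathlib
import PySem

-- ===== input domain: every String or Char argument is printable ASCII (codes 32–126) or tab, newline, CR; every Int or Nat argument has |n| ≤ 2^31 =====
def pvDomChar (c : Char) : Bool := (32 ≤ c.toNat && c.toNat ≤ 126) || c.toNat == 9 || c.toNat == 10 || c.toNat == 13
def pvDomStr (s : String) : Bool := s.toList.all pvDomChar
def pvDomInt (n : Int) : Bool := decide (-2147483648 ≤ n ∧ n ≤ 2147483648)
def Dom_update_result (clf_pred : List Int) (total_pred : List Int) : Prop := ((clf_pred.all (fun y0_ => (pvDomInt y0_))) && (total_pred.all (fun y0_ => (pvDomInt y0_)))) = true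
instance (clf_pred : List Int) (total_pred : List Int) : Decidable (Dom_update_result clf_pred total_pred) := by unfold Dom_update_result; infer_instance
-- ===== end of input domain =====

-- B replaces A's single scan with a running counter and early break by a prefix-sum
-- formulation: a table prefix[i] = number of zeros among total_pred[:i] is built
-- first, then each qualifying position is assigned clf_pred[prefix[i]] independently.
-- Same return value; both Pythons mutate total_pred in place identically, so the
-- return-value equivalence proved here covers the observable effect.
-- Indices come from range(len(total_pred)-1), hence are in range, so getD/set are exact.

-- ===== PORT A =====
-- loop over i in range(0, len(total_pred)-1) carrying (total, index), with break
def update_result_go (clf : List Int) (l : Nat) : List Nat → List Int → Nat → List Int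
  | [], total, _ => total
  | i :: rest, total, index =>
    let st := if total.getD i 0 = 0 then (total.set i (clf.getD index 0), index + 1)
              else (total, index)
    if st.2 = l then st.1 else update_result_go clf l rest st.1 st.2

def update_result (clf_pred : List Int) (total_pred : List Int) : List Int :=
  update_result_go clf_pred clf_pred.length (List.range (total_pred.length - 1)) total_pred 0

-- ===== PORT B =====
-- the prefix table: (update_result_prefix xs c).getD j 0 = c + #zeros among xs[:j]
def update_result_prefix : List Int → Nat → List Nat
  | [], c => [c]
  | v :: rest, c => c :: update_result_prefix rest (c + if v = 0 then 1 else 0)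

def update_result_alt (clf_pred : List Int) (total_pred : List Int) : List Int :=
  let pref := update_result_prefix total_pred 0
  (List.range (total_pred.length - 1)).foldl
    (fun t i =>
      if t.getD i 0 = 0 ∧ pref.getD i 0 < clf_pred.length
      then t.set i (clf_pred.getD (pref.getD i 0) 0) else t)
    total_pred

-- ===== PRECONDITION & SPEC =====
-- Pre_ excludes exactly the inputs where A raises IndexError: empty clf_pred with a
-- zero first entry of a total_pred of length ≥ 2 (A reads clf_pred[0] there).
def Pre_update_result (clf_pred : List Int) (total_pred : List Int) : Prop :=
  ¬ (clf_pred = [] ∧ 2 ≤ total_pred.length ∧ total_pred.getD 0 0 = 0)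
instance (clf_pred : List Int) (total_pred : List Int) : Decidable (Pre_update_result clf_pred total_pred) := by unfold Pre_update_result; infer_instance

def pvWitness_update_result : List Int × List Int := ([5], [0, 2, 0, 7])

def Spec_update_result (clf_pred : List Int) (total_pred : List Int) (out : List Int) : Prop := out = update_result_alt clf_pred total_pred
instance (clf_pred : List Int) (total_pred : List Int) (out : List Int) : Decidable (Spec_update_result clf_pred total_pred out) := by unfold Spec_update_result; infer_instance

-- ===== CLAIM (what is proved, stated in full; the proofs are below) =====
def Claim_equal_update_result : Prop := ∀ (clf_pred : List Int) (total_pred : List Int), Dom_update_result clf_pred total_pred → Pre_update_result clf_pred total_pred → Spec_update_result clf_pred total_pred (update_result clf_pred total_pred)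

-- ===== LEMMAS AND PROOFS =====

-- Common reference: fill the positions zs in order from clf starting at source
-- index `index`, stopping once `index` reaches l.
def bFill (clf : List Int) (l : Nat) : List Int → List Nat → Nat → List Int
  | total, [], _ => total
  | total, i :: rest, index =>
    if index = l then total
    else bFill clf l (total.set i (clf.getD index 0)) rest (index + 1)

theorem bFill_stop (clf : List Int) (l : Nat) (total : List Int) (zs : List Nat) :
    bFill clf l total zs l = total := by
  cases zs <;> simp [bFill]

-- A-side invariant: A's loop over a duplicate-free index list equals bFill over the
-- zero positions of the CURRENT total, as long as index < l at entry.
theorem go_eq_bFill (clf : List Int) (l : Nat) :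
    ∀ (is : List Nat) (total : List Int) (index : Nat), is.Nodup → index < l →
    update_result_go clf l is total index =
      bFill clf l total (is.filter (fun i => total.getD i 0 = 0)) index := by
  intro is
  induction is with
  | nil => intro total index _ _; simp [update_result_go, bFill]
  | cons i rest ih =>
    intro total index hnd hlt
    have hni : i ∉ rest := (List.nodup_cons.mp hnd).1
    have hndr : rest.Nodup := (List.nodup_cons.mp hnd).2
    by_cases hz : total.getD i 0 = 0
    · have hz' : total[i]?.getD 0 = 0 := by simpa [List.getD] using hz
      have hfilt : rest.filter (fun j => (total.set i (clf.getD index 0)).getD j 0 = 0)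
          = rest.filter (fun j => total.getD j 0 = 0) := by
        apply List.filter_congr
        intro j hj
        have hij : j ≠ i := fun h => hni (h ▸ hj)
        simp [List.getD, List.getElem?_set_ne (Ne.symm hij)]
      have hstep : update_result_go clf l (i :: rest) total index
          = (if index + 1 = l then total.set i (clf.getD index 0)
             else update_result_go clf l rest (total.set i (clf.getD index 0)) (index + 1)) := by
        simp [update_result_go, hz']
      have hfc : (i :: rest).filter (fun j => total.getD j 0 = 0)
          = i :: rest.filter (fun j => total.getD j 0 = 0) := by
        simp [List.getD, hz']
      rw [hstep, hfc]
      by_cases hb : index + 1 = l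
      · rw [if_pos hb]
        simp only [bFill, if_neg (show ¬ index = l by omega), hb, bFill_stop]
      · rw [if_neg hb]
        simp only [bFill, if_neg (show ¬ index = l by omega)]
        rw [ih _ (index + 1) hndr (by omega), hfilt]
    · have hz' : ¬ total[i]?.getD 0 = 0 := by simpa [List.getD] using hz
      have hstep : update_result_go clf l (i :: rest) total index
          = update_result_go clf l rest total index := by
        simp [update_result_go, hz']
        exact fun h => absurd h (by omega)
      rw [hstep, ih _ index hndr hlt,
        List.filter_cons_of_neg (by simp [List.getD, hz'])]

-- B-side lemma 1: the prefix table holds the running zero counts.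
theorem prefix_getD : ∀ (xs : List Int) (c : Nat) (j : Nat), j ≤ xs.length →
    (update_result_prefix xs c).getD j 0 = c + (xs.take j).countP (fun v => decide (v = 0)) := by
  intro xs
  induction xs with
  | nil =>
    intro c j hj
    have : j = 0 := by simpa using hj
    subst this
    simp [update_result_prefix]
  | cons v rest ih =>
    intro c j hj
    cases j with
    | zero => simp [update_result_prefix]
    | succ j =>
      simp only [update_result_prefix, List.getD_cons_succ, List.take_succ_cons,
        List.countP_cons]
      rw [ih _ j (by simpa using hj)]
      by_cases hv : v = 0 <;> simp [hv] <;> omega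

-- B-side lemma 2: count of zeros in a prefix = number of zero indices below m.
theorem cnt_eq_filter_range (total : List Int) :
    ∀ (m : Nat), m ≤ total.length →
    (total.take m).countP (fun v => decide (v = 0))
      = ((List.range m).filter (fun i => decide (total.getD i 0 = 0))).length := by
  intro m
  induction m with
  | zero => simp
  | succ m ih =>
    intro hm
    have hm' : m < total.length := by omega
    have ht : total.take (m + 1) = total.take m ++ [total[m]] :=
      List.take_succ_eq_append_getElem hm'
    rw [ht, List.countP_append, List.range_succ, List.filter_append, List.length_append,
      ih (by omega)]
    by_cases hz : total[m] = 0 <;>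
      simp [List.getD, List.getElem?_eq_getElem hm', hz]

-- B-side lemma 3 (rank): the j-th zero index has exactly j zeros before it.
theorem rank_lemma (total : List Int) :
    ∀ (m : Nat), m ≤ total.length →
    ∀ (j : Nat) (h : j < ((List.range m).filter (fun i => decide (total.getD i 0 = 0))).length),
    (((List.range m).filter (fun i => decide (total.getD i 0 = 0)))[j]'h).succ ≤ total.length ∧
    (total.take (((List.range m).filter (fun i => decide (total.getD i 0 = 0)))[j]'h)).countP
        (fun v => decide (v = 0)) = j := by
  intro m
  induction m with
  | zero => intro _ j h; simp at h
  | succ m ih =>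
    intro hm j h
    have key : (List.range (m + 1)).filter (fun i => decide (total.getD i 0 = 0))
        = (List.range m).filter (fun i => decide (total.getD i 0 = 0))
          ++ [m].filter (fun i => decide (total.getD i 0 = 0)) := by
      rw [List.range_succ, List.filter_append]
    set zs := (List.range m).filter (fun i => decide (total.getD i 0 = 0)) with hzs
    have h' : j < (zs ++ [m].filter (fun i => decide (total.getD i 0 = 0))).length := by
      rw [← key]; exact h
    have hg : ((List.range (m + 1)).filter (fun i => decide (total.getD i 0 = 0)))[j]'h
        = (zs ++ [m].filter (fun i => decide (total.getD i 0 = 0)))[j]'h' :=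
      List.getElem_of_eq key h
    rw [hg]
    by_cases hj : j < zs.length
    · have := ih (by omega) j hj
      simpa [List.getElem_append_left hj] using this
    · have hlen : ([m].filter (fun i => decide (total.getD i 0 = 0))).length ≠ 0 := by
        intro h0
        simp only [List.length_append, h0] at h'
        omega
      have hzm : total.getD m 0 = 0 := by
        by_contra hc
        apply hlen
        simp [List.filter_cons]
        exact hc
      have hfm : [m].filter (fun i => decide (total.getD i 0 = 0)) = [m] := by
        simp [List.filter_cons]
        exact hzm
      have hj' : j = zs.length := by
        simp only [List.length_append, hfm, List.length_cons, List.length_nil] at h'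
        omega
      have key2 : zs ++ [m].filter (fun i => decide (total.getD i 0 = 0)) = zs ++ [m] := by
        rw [hfm]
      have h2 : j < (zs ++ [m]).length := by rw [← key2]; exact h'
      have hget : ((zs ++ [m].filter (fun i => decide (total.getD i 0 = 0)))[j]'h')
          = (zs ++ [m])[j]'h2 := List.getElem_of_eq key2 h'
      have hget2 : (zs ++ [m])[j]'h2 = m := by
        subst hj'
        simp
      rw [hget, hget2]
      refine ⟨by omega, ?_⟩
      rw [cnt_eq_filter_range total m (by omega), hj', hzs]

-- B-side lemma 4: reading the current list equals reading the base list while the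
-- touched indices are duplicate-free.
theorem fold_read_congr (p : Nat → Nat) (l : Nat) (clf : List Int) :
    ∀ (is : List Nat) (t base : List Int), is.Nodup →
    (∀ j ∈ is, t.getD j 0 = base.getD j 0) →
    is.foldl (fun t i => if t.getD i 0 = 0 ∧ p i < l then t.set i (clf.getD (p i) 0) else t) t
      = is.foldl (fun t i => if base.getD i 0 = 0 ∧ p i < l then t.set i (clf.getD (p i) 0) else t) t := by
  intro is
  induction is with
  | nil => intro t base _ _; rfl
  | cons i rest ih =>
    intro t base hnd hag
    have hni : i ∉ rest := (List.nodup_cons.mp hnd).1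
    have hndr : rest.Nodup := (List.nodup_cons.mp hnd).2
    have hi : t.getD i 0 = base.getD i 0 := hag i (by simp)
    simp only [List.foldl_cons, hi]
    by_cases hc : base.getD i 0 = 0 ∧ p i < l
    · rw [if_pos hc]
      apply ih _ _ hndr
      intro j hj
      have hij : j ≠ i := fun h => hni (h ▸ hj)
      rw [← hag j (by simp [hj])]
      simp [List.getD, List.getElem?_set_ne (Ne.symm hij)]
    · rw [if_neg hc]
      exact ih _ _ hndr (fun j hj => hag j (by simp [hj]))

-- B-side lemma 5: a guarded fold is the fold over the filtered list.
theorem fold_filter (g : List Int → Nat → List Int) (Q : Nat → Prop) [DecidablePred Q] :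
    ∀ (is : List Nat) (t : List Int),
    is.foldl (fun t i => if Q i then g t i else t) t
      = (is.filter (fun i => decide (Q i))).foldl g t := by
  intro is
  induction is with
  | nil => intro t; rfl
  | cons i rest ih =>
    intro t
    by_cases hq : Q i <;> simp [hq, ih]

-- B-side lemma 6a: if every rank is ≥ l nothing is written.
theorem fold_skip (p : Nat → Nat) (l : Nat) (clf : List Int) :
    ∀ (ys : List Nat) (t : List Int), (∀ i ∈ ys, l ≤ p i) →
    ys.foldl (fun t i => if p i < l then t.set i (clf.getD (p i) 0) else t) t = t := by
  intro ys
  induction ys with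
  | nil => intro t _; rfl
  | cons y rest ih =>
    intro t hall
    have : ¬ p y < l := by have := hall y (by simp); omega
    simp only [List.foldl_cons, if_neg this]
    exact ih t (fun i hi => hall i (by simp [hi]))

-- B-side lemma 6: rank-indexed independent assignment equals sequential bFill.
theorem fold_eq_bFill (p : Nat → Nat) (l : Nat) (clf : List Int) :
    ∀ (ys : List Nat) (r : Nat) (t : List Int), r ≤ l →
    (∀ (j : Nat) (h : j < ys.length), p (ys[j]'h) = r + j) →
    ys.foldl (fun t i => if p i < l then t.set i (clf.getD (p i) 0) else t) t
      = bFill clf l t ys r := by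
  intro ys
  induction ys with
  | nil => intro r t _ _; rfl
  | cons y rest ih =>
    intro r t hrl hrank
    have hy : p y = r := by simpa using hrank 0 (by simp)
    by_cases hr : r < l
    · simp only [List.foldl_cons, hy, if_pos hr, bFill, if_neg (show ¬ r = l by omega)]
      exact ih (r + 1) _ (by omega)
        (fun j h => by simpa [Nat.add_assoc, Nat.add_comm 1 j] using hrank (j + 1) (by simpa using h))
    · have hrl' : r = l := by omega
      subst hrl'
      rw [bFill_stop]
      apply fold_skip
      intro i hi
      obtain ⟨j, hj, rfl⟩ := List.mem_iff_getElem.mp hi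
      rw [hrank j hj]
      omega

-- a fold that never changes the accumulator
theorem foldl_id {α : Type} : ∀ (is : List Nat) (t : α),
    is.foldl (fun t _ => t) t = t := by
  intro is
  induction is with
  | nil => intro t; rfl
  | cons i rest ih => intro t; simp [ih]

-- ===== VERDICT (by name: the statement is the Claim_ definition above) =====
theorem update_result_spec : Claim_equal_update_result := by
  intro clf total _ hpre
  unfold Spec_update_result update_result update_result_alt
  by_cases hl : clf.length = 0
  · -- clf empty: B writes nothing (no rank is < 0); A breaks before writing under Pre_
    have hclf : clf = [] := List.eq_nil_of_length_eq_zero hl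
    have hB : (List.range (total.length - 1)).foldl
        (fun t i => if t.getD i 0 = 0 ∧ (update_result_prefix total 0).getD i 0 < clf.length
          then t.set i (clf.getD ((update_result_prefix total 0).getD i 0) 0) else t) total = total := by
      have hfun : (fun (t : List Int) (i : Nat) =>
          if t.getD i 0 = 0 ∧ (update_result_prefix total 0).getD i 0 < clf.length
          then t.set i (clf.getD ((update_result_prefix total 0).getD i 0) 0) else t)
          = fun t _ => t := by
        funext t i
        rw [if_neg]
        rintro ⟨-, hlt⟩
        omega
      rw [hfun, foldl_id]
    rw [hB]
    rcases Nat.lt_or_ge total.length 2 with hlen | hlen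
    · have : total.length - 1 = 0 := by omega
      simp [this, update_result_go]
    · have hz : ¬ total[0]?.getD 0 = 0 := by
        intro h; exact hpre ⟨hclf, hlen, by simpa [List.getD] using h⟩
      have h1 : total.length - 1 = (total.length - 2) + 1 := by omega
      rw [h1, List.range_succ_eq_map]
      simp [update_result_go, hz, hl]
  · -- clf nonempty: both sides equal bFill over the zero positions
    have hA := go_eq_bFill clf clf.length (List.range (total.length - 1)) total 0
      (List.nodup_range) (by omega)
    rw [hA]
    set p : Nat → Nat := fun i => (update_result_prefix total 0).getD i 0 with hp
    have hfun : (fun (t : List Int) (i : Nat) =>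
        if t.getD i 0 = 0 ∧ p i < clf.length
        then t.set i (clf.getD (p i) 0) else t)
        = fun t i => if t.getD i 0 = 0 then
            (if p i < clf.length then t.set i (clf.getD (p i) 0) else t) else t := by
      funext t i
      by_cases h1 : t.getD i 0 = 0 <;> by_cases h2 : p i < clf.length <;> simp [h2]
    rw [show ((List.range (total.length - 1)).foldl
        (fun t i => if t.getD i 0 = 0 ∧ p i < clf.length
          then t.set i (clf.getD (p i) 0) else t) total)
      = ((List.range (total.length - 1)).foldl
        (fun t i => if total.getD i 0 = 0 ∧ p i < clf.length
          then t.set i (clf.getD (p i) 0) else t) total) from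
      fold_read_congr p clf.length clf _ total total (List.nodup_range) (fun _ _ => rfl)]
    have hfun2 : (fun (t : List Int) (i : Nat) =>
        if total.getD i 0 = 0 ∧ p i < clf.length
        then t.set i (clf.getD (p i) 0) else t)
        = fun t i => if total.getD i 0 = 0 then
            (if p i < clf.length then t.set i (clf.getD (p i) 0) else t) else t := by
      funext t i
      by_cases h1 : total.getD i 0 = 0 <;> by_cases h2 : p i < clf.length <;> simp [h2]
    rw [hfun2, fold_filter (fun t i => if p i < clf.length then t.set i (clf.getD (p i) 0) else t)
      (fun i => total.getD i 0 = 0)]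
    apply Eq.symm
    apply fold_eq_bFill p clf.length clf _ 0 total (by omega)
    intro j h
    have := rank_lemma total (total.length - 1) (by omega) j h
    obtain ⟨hle, hcnt⟩ := this
    rw [hp]
    simp only
    rw [prefix_getD total 0 _ (by omega), hcnt]
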